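-- pv_equiv track=rewrite | github.com/barry2051/pgx-cds-prototype | PGx_CDS_Dashboard_V1.py | extract_genes_from_text
-- ===== SOURCE A (Python) =====
-- def extract_genes_from_text(text):
--     gene_panel = [
--         "CYP1A2", "CYP2B6", "CYP2C19", "CYP2C9", "CYP2D6",
--         "CYP3A4", "CYP3A5", "UGT1A4", "UGT2B15",
--         "HTR2A", "SLC6A4", "HLA-A*31:01", "HLA-B*15:02",
--         "MTHFR", "COMT"
--     ]
--     phenotype_keywords = [
--         "Normal Metabolizer", "Poor Metabolizer", "Intermediate Metabolizer",
--         "Ultra-rapid Metabolizer", "Decreased Function", "Increased Risk",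
--         "Positive", "Negative", "Val/Val", "A/C", "C/T", "Short/Short", "Short", "Long"
--     ]
--     genes = []
--     found_genes = set()
--     for gene in gene_panel:
--         gene_stripped = gene.replace("*", "")
--         for line in text.splitlines():
--             line_stripped = line.replace("*", "")
--             if gene_stripped in line_stripped or (
--                 gene.startswith("HLA-A") and "HLA-A" in line and "31:01" in line
--             ) or (
--                 gene.startswith("HLA-B") and "HLA-B" in line and "15:02" in line
--             ):
--                 for keyword in phenotype_keywords:
--                     if keyword in line:
--                         genes.append((gene, keyword))
--                         found_genes.add(gene)
--                         break
--     for gene in gene_panel: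
--         if gene not in found_genes:
--             genes.append((gene, "Not Reported"))
--     return genes
-- ===== SOURCE B (Python) =====
-- def extract_genes_from_text(text):
--     gene_panel = [
--         "CYP1A2", "CYP2B6", "CYP2C19", "CYP2C9", "CYP2D6",
--         "CYP3A4", "CYP3A5", "UGT1A4", "UGT2B15",
--         "HTR2A", "SLC6A4", "HLA-A*31:01", "HLA-B*15:02",
--         "MTHFR", "COMT"
--     ]
--     phenotype_keywords = [
--         "Normal Metabolizer", "Poor Metabolizer", "Intermediate Metabolizer",
--         "Ultra-rapid Metabolizer", "Decreased Function", "Increased Risk",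
--         "Positive", "Negative", "Val/Val", "A/C", "C/T", "Short/Short", "Short", "Long"
--     ]
--     # One pass over the lines: find the line's first phenotype keyword once,
--     # then credit it to every gene whose match condition the line satisfies.
--     matches = {}
--     for line in text.splitlines():
--         kw = next((k for k in phenotype_keywords if k in line), None)
--         if kw is None:
--             continue
--         line_nostar = line.replace("*", "")
--         for gene in gene_panel:
--             if gene.replace("*", "") in line_nostar or (
--                 gene.startswith("HLA-A") and "HLA-A" in line and "31:01" in line
--             ) or (
--                 gene.startswith("HLA-B") and "HLA-B" in line and "15:02" in line
--             ):
--                 matches[gene] = matches.get(gene, []) + [kw]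
--     result = [(g, kw) for g in gene_panel for kw in matches.get(g, [])]
--     result += [(g, "Not Reported") for g in gene_panel if g not in matches]
--     return result
-- ===== Notes on version B (the rewrite author's own statement) =====
-- stated objective: alternative
-- what changed: Replaced A's gene-major triple nested loop (panel x lines x keywords per gene, with a found-set and trailing Not-Reported pass) by a single line-major pass that finds each line's first phenotype keyword once and groups hits per gene in a dict, then emits found pairs and Not-Reported genes in panel order.
import Mathlib
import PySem

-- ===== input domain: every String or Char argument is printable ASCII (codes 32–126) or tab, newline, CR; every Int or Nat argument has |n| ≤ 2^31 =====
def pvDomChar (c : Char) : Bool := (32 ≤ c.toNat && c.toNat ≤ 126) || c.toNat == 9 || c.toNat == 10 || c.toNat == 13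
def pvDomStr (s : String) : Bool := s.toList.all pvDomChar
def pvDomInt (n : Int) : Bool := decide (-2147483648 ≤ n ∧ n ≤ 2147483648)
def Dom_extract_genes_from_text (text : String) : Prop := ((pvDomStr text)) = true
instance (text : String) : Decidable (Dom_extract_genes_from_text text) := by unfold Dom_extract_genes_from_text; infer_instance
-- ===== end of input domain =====

-- B replaces A's gene-major triple loop by a single line-major pass that finds each
-- line's first keyword once and groups hits per gene in a dict (objective: alternative).

-- shared literal constants (identical lists in both Python sources)
def pvGenePanel : List String :=
  ["CYP1A2", "CYP2B6", "CYP2C19", "CYP2C9", "CYP2D6",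
   "CYP3A4", "CYP3A5", "UGT1A4", "UGT2B15",
   "HTR2A", "SLC6A4", "HLA-A*31:01", "HLA-B*15:02",
   "MTHFR", "COMT"]

def pvPhenoKeywords : List String :=
  ["Normal Metabolizer", "Poor Metabolizer", "Intermediate Metabolizer",
   "Ultra-rapid Metabolizer", "Decreased Function", "Increased Risk",
   "Positive", "Negative", "Val/Val", "A/C", "C/T", "Short/Short", "Short", "Long"]

-- ===== PORT A =====
-- A's inner keyword loop with break
def pvAKwLoop : List String → String → String → List (String × String) → PySem.Set String →
    List (String × String) × PySem.Set String
  | [], _, _, genes, found => (genes, found)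
  | k :: rest, line, gene, genes, found =>
    if PySem.Str.isIn k line then (genes ++ [(gene, k)], found.add gene)
    else pvAKwLoop rest line gene genes found

-- body of A's loop over the lines (for a fixed gene)
def pvALineStep (gene gene_stripped : String)
    (st : List (String × String) × PySem.Set String) (line : String) :
    List (String × String) × PySem.Set String :=
  let line_stripped := PySem.Str.replace line "*" ""
  if PySem.Str.isIn gene_stripped line_stripped
     || (PySem.Str.startswith gene "HLA-A" && PySem.Str.isIn "HLA-A" line && PySem.Str.isIn "31:01" line)
     || (PySem.Str.startswith gene "HLA-B" && PySem.Str.isIn "HLA-B" line && PySem.Str.isIn "15:02" line)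
  then pvAKwLoop pvPhenoKeywords line gene st.1 st.2
  else st

def extract_genes_from_text (text : String) : List (String × String) :=
  let st := pvGenePanel.foldl (fun st gene =>
    (PySem.Str.splitlines text).foldl (pvALineStep gene (PySem.Str.replace gene "*" "")) st)
    ([], PySem.Set.empty)
  st.1 ++ pvGenePanel.foldl (fun acc gene =>
    if st.2.contains gene then acc else acc ++ [(gene, "Not Reported")]) []

-- ===== PORT B =====
-- body of B's loop over the panel (for a fixed line whose first keyword is kw)
def pvBGeneStep (line line_nostar kw : String) (d : PySem.Dict String (List String))
    (gene : String) : PySem.Dict String (List String) :=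
  if PySem.Str.isIn (PySem.Str.replace gene "*" "") line_nostar
     || (PySem.Str.startswith gene "HLA-A" && PySem.Str.isIn "HLA-A" line && PySem.Str.isIn "31:01" line)
     || (PySem.Str.startswith gene "HLA-B" && PySem.Str.isIn "HLA-B" line && PySem.Str.isIn "15:02" line)
  then d.insert gene (d.getD gene [] ++ [kw])
  else d

-- body of B's single pass over the lines
def pvBLineStep (d : PySem.Dict String (List String)) (line : String) :
    PySem.Dict String (List String) :=
  match pvPhenoKeywords.find? (fun k => PySem.Str.isIn k line) with
  | none => d
  | some kw => pvGenePanel.foldl (pvBGeneStep line (PySem.Str.replace line "*" "") kw) d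

def extract_genes_from_text_alt (text : String) : List (String × String) :=
  let tbl := (PySem.Str.splitlines text).foldl pvBLineStep PySem.Dict.empty
  (pvGenePanel.flatMap fun g => (tbl.getD g []).map fun kw => (g, kw))
  ++ ((pvGenePanel.filter fun g => !tbl.contains g).map fun g => (g, "Not Reported"))

-- ===== PRECONDITION & SPEC =====
def Spec_extract_genes_from_text (text : String) (out : List (String × String)) : Prop := out = extract_genes_from_text_alt text
instance (text : String) (out : List (String × String)) : Decidable (Spec_extract_genes_from_text text out) := by unfold Spec_extract_genes_from_text; infer_instance

-- ===== CLAIM (what is proved, stated in full; the proofs are below) =====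
def Claim_equal_extract_genes_from_text : Prop := ∀ (text : String), Dom_extract_genes_from_text text → Spec_extract_genes_from_text text (extract_genes_from_text text)

-- ===== LEMMAS AND PROOFS =====

-- the match condition both programs test, and a line's first keyword
def pvCond (gene line : String) : Bool :=
  PySem.Str.isIn (PySem.Str.replace gene "*" "") (PySem.Str.replace line "*" "")
  || (PySem.Str.startswith gene "HLA-A" && PySem.Str.isIn "HLA-A" line && PySem.Str.isIn "31:01" line)
  || (PySem.Str.startswith gene "HLA-B" && PySem.Str.isIn "HLA-B" line && PySem.Str.isIn "15:02" line)

def pvKw? (line : String) : Option String :=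
  pvPhenoKeywords.find? (fun k => PySem.Str.isIn k line)

-- the keywords a gene collects from the lines, in line order
def pvKwSeg (lines : List String) (g : String) : List String :=
  lines.filterMap fun l => (pvKw? l).bind fun k => if pvCond g l then some k else none

theorem pvKwSeg_nil (g : String) : pvKwSeg [] g = [] := rfl

theorem pvKwSeg_cons (l : String) (ls : List String) (g : String) :
    pvKwSeg (l :: ls) g =
      (match pvKw? l with
       | some k => if pvCond g l then k :: pvKwSeg ls g else pvKwSeg ls g
       | none => pvKwSeg ls g) := by
  simp only [pvKwSeg, List.filterMap_cons]
  cases pvKw? l with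
  | none => rfl
  | some k => by_cases h : pvCond g l <;> simp [h]

-- ---- A side ----

theorem pvAKwLoop_eq (kws : List String) (line gene : String)
    (gs : List (String × String)) (f : PySem.Set String) :
    pvAKwLoop kws line gene gs f =
      (match kws.find? (fun k => PySem.Str.isIn k line) with
       | some k => (gs ++ [(gene, k)], f.add gene)
       | none => (gs, f)) := by
  induction kws with
  | nil => rfl
  | cons k rest ih =>
    have hunf : pvAKwLoop (k :: rest) line gene gs f =
        if PySem.Str.isIn k line then (gs ++ [(gene, k)], f.add gene)
        else pvAKwLoop rest line gene gs f := rfl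
    rw [hunf, List.find?_cons]
    cases hi : PySem.Str.isIn k line
    · simp only [Bool.false_eq_true, if_false, ih]
    · simp only [if_true]

theorem pvALineLoop_eq (lines : List String) (gene : String)
    (gs : List (String × String)) (f : PySem.Set String) :
    lines.foldl (pvALineStep gene (PySem.Str.replace gene "*" "")) (gs, f) =
      (gs ++ (pvKwSeg lines gene).map (fun k => (gene, k)),
       if (pvKwSeg lines gene).isEmpty then f else f.add gene) := by
  induction lines generalizing gs f with
  | nil => simp [pvKwSeg_nil]
  | cons l ls ih =>
    rw [List.foldl_cons]
    have hstep : pvALineStep gene (PySem.Str.replace gene "*" "") (gs, f) l =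
        if pvCond gene l then pvAKwLoop pvPhenoKeywords l gene gs f else (gs, f) := rfl
    rw [hstep, pvKwSeg_cons]
    by_cases hc : pvCond gene l
    · rw [if_pos hc, pvAKwLoop_eq,
        show (pvPhenoKeywords.find? fun k => PySem.Str.isIn k l) = pvKw? l from rfl]
      cases hk : pvKw? l with
      | none => simp [ih]
      | some k => simp [ih, hc]
    · rw [if_neg hc, ih]
      cases pvKw? l <;> simp [hc]

-- the full gene-major loop of A
theorem pvAGeneLoop_eq (panel : List String) (lines : List String)
    (gs : List (String × String)) (f : PySem.Set String) :
    panel.foldl (fun st gene =>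
        lines.foldl (pvALineStep gene (PySem.Str.replace gene "*" "")) st) (gs, f) =
      (gs ++ panel.flatMap (fun g => (pvKwSeg lines g).map (fun k => (g, k))),
       panel.foldl (fun f g => if (pvKwSeg lines g).isEmpty then f else f.add g) f) := by
  induction panel generalizing gs f with
  | nil => simp
  | cons g rest ih =>
    rw [List.foldl_cons, pvALineLoop_eq, List.foldl_cons, ih]
    simp

theorem pvSet_contains_add (f : PySem.Set String) (g x : String) :
    (f.add g).contains x = (f.contains x || x == g) := by
  rw [PySem.Set.add_eq_ite]
  by_cases hx : x = g <;> by_cases hm : g ∈ f <;> simp [*, beq_iff_eq]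

theorem pvFoundContains (panel : List String) (lines : List String)
    (f : PySem.Set String) (x : String) :
    (panel.foldl (fun f g => if (pvKwSeg lines g).isEmpty then f else f.add g) f).contains x
      = (f.contains x || panel.any (fun g => g == x && !(pvKwSeg lines g).isEmpty)) := by
  induction panel generalizing f with
  | nil => simp
  | cons g rest ih =>
    rw [List.foldl_cons, List.any_cons]
    cases he : (pvKwSeg lines g).isEmpty
    · simp only [Bool.false_eq_true, if_false, ih, pvSet_contains_add, Bool.not_false,
        Bool.and_true, Bool.or_assoc]
      have : (x == g) = (g == x) := by simp [eq_comm]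
      rw [this]
    · rw [if_pos rfl, ih]
      simp

-- A's trailing Not-Reported loop is an append of a filtered map
theorem pvNRLoop_eq (panel : List String) (p : String → Bool)
    (acc : List (String × String)) :
    panel.foldl (fun acc gene => if p gene then acc else acc ++ [(gene, "Not Reported")]) acc
      = acc ++ (panel.filter (fun g => !p g)).map (fun g => (g, "Not Reported")) := by
  induction panel generalizing acc with
  | nil => simp
  | cons g rest ih =>
    rw [List.foldl_cons, List.filter_cons]
    by_cases h : p g <;> simp [h, ih]

-- ---- B side ----

theorem pvBGeneStep_eq (line kw : String) (d : PySem.Dict String (List String)) (gene : String) :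
    pvBGeneStep line (PySem.Str.replace line "*" "") kw d gene =
      if pvCond gene line then d.insert gene (d.getD gene [] ++ [kw]) else d := rfl

theorem pvPanelNodup : pvGenePanel.Nodup := by decide

-- effect of one line's inner panel loop on lookups
theorem pvBInner_getD (gs : List String) (hnd : gs.Nodup) (line kw : String)
    (d : PySem.Dict String (List String)) (x : String) :
    (gs.foldl (pvBGeneStep line (PySem.Str.replace line "*" "") kw) d).getD x []
      = d.getD x [] ++ (if x ∈ gs ∧ pvCond x line then [kw] else []) := by
  induction gs generalizing d with
  | nil => simp
  | cons g rest ih =>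
    obtain ⟨hg, hrest⟩ := List.nodup_cons.mp hnd
    rw [List.foldl_cons, pvBGeneStep_eq]
    by_cases hc : pvCond g line
    · rw [if_pos hc, ih hrest]
      by_cases hx : x = g
      · subst hx
        have hnotin : x ∉ rest := hg
        simp [hc, hnotin]
      · simp [PySem.Dict.getD_insert, hx]
    · rw [if_neg hc, ih hrest]
      by_cases hx : x = g
      · subst hx; simp [hg, hc]
      · simp [hx]

theorem pvBInner_contains (gs : List String) (line kw : String)
    (d : PySem.Dict String (List String)) (x : String) :
    (gs.foldl (pvBGeneStep line (PySem.Str.replace line "*" "") kw) d).contains x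
      = (d.contains x || decide (x ∈ gs ∧ pvCond x line)) := by
  induction gs generalizing d with
  | nil => simp
  | cons g rest ih =>
    rw [List.foldl_cons, pvBGeneStep_eq]
    by_cases hc : pvCond g line
    · rw [if_pos hc, ih]
      by_cases hx : x = g
      · subst hx; simp [hc]
      · have hbe : (x == g) = false := by simp [hx]
        simp [PySem.Dict.contains_insert, hbe, hx]
    · rw [if_neg hc, ih]
      by_cases hx : x = g
      · subst hx; simp [hc]
      · simp [hx]

-- effect of the whole line pass on lookups
theorem pvBLineLoop_getD (lines : List String) (d : PySem.Dict String (List String)) (x : String) :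
    (lines.foldl pvBLineStep d).getD x []
      = d.getD x [] ++ (if x ∈ pvGenePanel then pvKwSeg lines x else []) := by
  induction lines generalizing d with
  | nil => simp [pvKwSeg_nil]
  | cons l ls ih =>
    rw [List.foldl_cons, pvKwSeg_cons]
    simp only [pvBLineStep]
    rw [show (pvPhenoKeywords.find? fun k => PySem.Str.isIn k l) = pvKw? l from rfl]
    cases hk : pvKw? l with
    | none => rw [ih]
    | some kw =>
      rw [ih, pvBInner_getD pvGenePanel pvPanelNodup]
      by_cases hp : x ∈ pvGenePanel
      · by_cases hc : pvCond x l <;> simp [hp, hc]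
      · simp [hp]

theorem pvBLineLoop_contains (lines : List String) (d : PySem.Dict String (List String)) (x : String) :
    (lines.foldl pvBLineStep d).contains x
      = (d.contains x || (decide (x ∈ pvGenePanel) && !(pvKwSeg lines x).isEmpty)) := by
  induction lines generalizing d with
  | nil => simp [pvKwSeg_nil]
  | cons l ls ih =>
    rw [List.foldl_cons, pvKwSeg_cons]
    simp only [pvBLineStep]
    rw [show (pvPhenoKeywords.find? fun k => PySem.Str.isIn k l) = pvKw? l from rfl]
    cases hk : pvKw? l with
    | none => rw [ih]
    | some kw =>
      rw [ih, pvBInner_contains]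
      by_cases hp : x ∈ pvGenePanel
      · by_cases hc : pvCond x l <;> simp [hp, hc, Bool.or_comm]
      · simp [hp]

theorem pvFlatMap_congr {α β : Type} (l : List α) (f g : α → List β)
    (h : ∀ x ∈ l, f x = g x) : l.flatMap f = l.flatMap g := by
  induction l with
  | nil => rfl
  | cons a t ih =>
    simp only [List.flatMap_cons, h a (List.mem_cons_self), ih fun x hx => h x (List.mem_cons_of_mem a hx)]

theorem pvAny_mem (l : List String) (g : String) (p : String → Bool) (hg : g ∈ l) :
    l.any (fun y => y == g && p y) = p g := by
  cases hp : p g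
  · apply List.any_eq_false.mpr
    intro y hy
    by_cases h : y = g
    · subst h; simp [hp]
    · simp [h]
  · exact List.any_eq_true.mpr ⟨g, hg, by simp [hp]⟩

-- ===== VERDICT (by name: the statement is the Claim_ definition above) =====
theorem extract_genes_from_text_spec : Claim_equal_extract_genes_from_text := by
  intro text _
  show extract_genes_from_text text = extract_genes_from_text_alt text
  unfold extract_genes_from_text extract_genes_from_text_alt
  rw [pvAGeneLoop_eq]
  dsimp only
  rw [pvNRLoop_eq, List.nil_append, List.nil_append]
  congr 1
  · apply pvFlatMap_congr
    intro g hg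
    rw [pvBLineLoop_getD, PySem.Dict.getD_empty, if_pos hg, List.nil_append]
  · congr 1
    apply List.filter_congr
    intro g hg
    rw [pvFoundContains, pvBLineLoop_contains]
    simp [hg, pvAny_mem pvGenePanel g _ hg, PySem.Set.empty]
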